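-- pv_equiv track=rewrite | github.com/DavidBerdik/cursor-view | cursor_view/chat_index.py | _preview_from_messages
-- ===== SOURCE A (Python) =====
-- from typing import Any, Iterator
--
-- def _trim_preview(text: str, limit: int = 240) -> str:
--     cleaned = " ".join((text or "").split())
--     if len(cleaned) <= limit:
--         return cleaned
--     return cleaned[: limit - 3].rstrip() + "..."
--
-- def _preview_from_messages(messages: list[dict[str, Any]]) -> str:
--     first_user = None
--     first_any = None
--     for msg in messages:
--         content = msg.get("content", "") if isinstance(msg, dict) else ""
--         if not isinstance(content, str) or not content.strip():
--             continue
--         if first_any is None: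
--             first_any = content
--         if msg.get("role") == "user":
--             first_user = content
--             break
--     return _trim_preview(first_user or first_any or "Content unavailable")
-- ===== SOURCE B (Python) =====
-- def _trim_preview(text: str, limit: int = 240) -> str:
--     cleaned = " ".join((text or "").split())
--     if len(cleaned) <= limit:
--         return cleaned
--     return cleaned[: limit - 3].rstrip() + "..."
--
-- def _preview_from_messages(messages) -> str:
--     # Traverse BACK-TO-FRONT with overwrite semantics: the last write (i.e. the
--     # earliest message in the original order) wins, so no early exit or
--     # write-once guard is needed.
--     user_c = None
--     any_c = None
--     for msg in reversed(messages):
--         if not isinstance(msg, dict):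
--             continue
--         content = msg.get("content", "")
--         if not isinstance(content, str) or not content.strip():
--             continue
--         any_c = content
--         if msg.get("role") == "user":
--             user_c = content
--     return _trim_preview(user_c or any_c or "Content unavailable")
-- ===== Notes on version B (the rewrite author's own statement) =====
-- stated objective: alternative
-- what changed: Replaces A's forward scan with write-once accumulators and an early break by a reversed (back-to-front) traversal with unconditional overwrite, whose last write is the first relevant message; no break and no None-guard on first_any.
import Mathlib
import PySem

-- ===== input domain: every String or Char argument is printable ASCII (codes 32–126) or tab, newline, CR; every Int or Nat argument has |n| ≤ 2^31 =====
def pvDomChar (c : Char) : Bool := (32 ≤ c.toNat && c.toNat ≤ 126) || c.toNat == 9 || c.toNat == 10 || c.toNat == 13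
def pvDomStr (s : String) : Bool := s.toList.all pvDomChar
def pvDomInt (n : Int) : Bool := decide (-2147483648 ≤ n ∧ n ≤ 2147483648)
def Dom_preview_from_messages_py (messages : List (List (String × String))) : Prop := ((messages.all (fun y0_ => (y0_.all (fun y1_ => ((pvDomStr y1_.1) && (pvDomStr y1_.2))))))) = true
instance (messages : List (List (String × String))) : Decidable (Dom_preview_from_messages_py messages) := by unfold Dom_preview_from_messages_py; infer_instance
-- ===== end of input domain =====

-- B replaces A's forward early-exit scan (write-once accumulators + break) by a reversed
-- traversal with unconditional overwrite, where the last write wins (objective: alternative).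


-- shared helper: port of _trim_preview (used verbatim by both A and B)
def trimPreview (text : String) : String :=
  let cleaned := PySem.Str.join " " (PySem.Str.split₀ text)
  if PySem.Str.len cleaned ≤ 240 then cleaned
  else PySem.Str.rstrip (PySem.Str.slice cleaned none (some 237)) ++ "..."

-- Python truthiness of 'x or y' for Optional[str] x (both ports return with the same 'or' chain)
def strOr (x : Option String) (y : String) : String :=
  match x with
  | some s => if s == "" then y else s
  | none => y

-- ===== PORT A =====
-- A's loop: carries first_any (fa); first_user is only ever set at the break, so the
-- recursion returns it directly.  isinstance checks are vacuously true under the typing.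
def pvALoop : List (List (String × String)) → Option String → Option String × Option String
  | [], fa => (none, fa)
  | msg :: rest, fa =>
    let content := (PySem.Dict.mk msg).getD "content" ""
    if PySem.Str.strip content == "" then pvALoop rest fa
    else
      let fa' := match fa with
        | none => some content
        | some c => some c
      if (PySem.Dict.mk msg).get? "role" == some "user" then (some content, fa')
      else pvALoop rest fa'

def preview_from_messages_py (messages : List (List (String × String))) : String :=
  let r := pvALoop messages none
  trimPreview (strOr r.1 (strOr r.2 "Content unavailable"))

-- ===== PORT B =====
-- B's loop body: overwrite any_c with the content, and user_c too when role == "user".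
def pvBStep (st : Option String × Option String) (msg : List (String × String)) :
    Option String × Option String :=
  let content := (PySem.Dict.mk msg).getD "content" ""
  if PySem.Str.strip content == "" then st
  else ((if (PySem.Dict.mk msg).get? "role" == some "user" then some content else st.1),
        some content)

def preview_from_messages_py_alt (messages : List (List (String × String))) : String :=
  let r := messages.reverse.foldl pvBStep (none, none)
  trimPreview (strOr r.1 (strOr r.2 "Content unavailable"))

-- ===== PRECONDITION & SPEC =====
def Spec_preview_from_messages_py (messages : List (List (String × String))) (out : String) : Prop := out = preview_from_messages_py_alt messages
instance (messages : List (List (String × String))) (out : String) : Decidable (Spec_preview_from_messages_py messages out) := by unfold Spec_preview_from_messages_py; infer_instance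

-- ===== CLAIM (what is proved, stated in full; the proofs are below) =====
def Claim_equal_preview_from_messages_py : Prop := ∀ (messages : List (List (String × String))), Dom_preview_from_messages_py messages → Spec_preview_from_messages_py messages (preview_from_messages_py messages)

-- ===== LEMMAS AND PROOFS =====

-- first user content / first valid content of the list, the common characterization
def pvFU (ms : List (List (String × String))) : Option String :=
  (ms.find? (fun m => !(PySem.Str.strip ((PySem.Dict.mk m).getD "content" "") == "")
      && (PySem.Dict.mk m).get? "role" == some "user")).map
    (fun m => (PySem.Dict.mk m).getD "content" "")

def pvFA (ms : List (List (String × String))) : Option String :=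
  (ms.find? (fun m => !(PySem.Str.strip ((PySem.Dict.mk m).getD "content" "") == ""))).map
    (fun m => (PySem.Dict.mk m).getD "content" "")

theorem pvALoop_eq (ms : List (List (String × String))) (fa : Option String) :
    pvALoop ms fa = (pvFU ms, fa.orElse (fun _ => pvFA ms)) := by
  induction ms generalizing fa with
  | nil => cases fa <;> rfl
  | cons m rest ih =>
    by_cases h : PySem.Str.strip ((PySem.Dict.mk m).getD "content" "") == ""
    · simp only [pvALoop, pvFU, pvFA, List.find?_cons, h, Bool.not_true, Bool.false_and,
        if_pos]
      exact ih fa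
    · by_cases hu : (PySem.Dict.mk m).get? "role" == some "user"
      all_goals
        simp only [pvALoop, pvFU, pvFA, List.find?_cons, h, hu, Bool.not_false, Bool.true_and,
          Option.map_some] at *
      · cases fa <;> rfl
      · cases fa <;> simp [ih, Option.orElse]

theorem pvBFold_eq (ms : List (List (String × String))) (st : Option String × Option String) :
    ms.reverse.foldl pvBStep st =
      ((pvFU ms).orElse (fun _ => st.1), (pvFA ms).orElse (fun _ => st.2)) := by
  induction ms generalizing st with
  | nil => cases st with | mk a b => cases a <;> cases b <;> rfl
  | cons m rest ih =>
    rw [List.reverse_cons, List.foldl_append, ih]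
    by_cases h : PySem.Str.strip ((PySem.Dict.mk m).getD "content" "") == ""
    · simp only [pvBStep, pvFU, pvFA, List.find?_cons, h, Bool.not_true, Bool.false_and,
        if_pos, List.foldl_cons, List.foldl_nil]
    · by_cases hu : (PySem.Dict.mk m).get? "role" == some "user"
      all_goals
        simp only [pvBStep, pvFU, pvFA, List.find?_cons, h, hu, Bool.not_false, Bool.true_and,
          Option.map_some, List.foldl_cons, List.foldl_nil]
      all_goals cases (pvFU rest) <;> cases (pvFA rest) <;> rfl

-- ===== VERDICT (by name: the statement is the Claim_ definition above) =====
theorem preview_from_messages_py_spec : Claim_equal_preview_from_messages_py := by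
  intro messages _
  unfold Spec_preview_from_messages_py preview_from_messages_py preview_from_messages_py_alt
  rw [pvALoop_eq, pvBFold_eq]
  cases h : pvFU messages <;> cases h2 : pvFA messages <;> simp [Option.orElse]
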